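-- pv_equiv track=rewrite | github.com/ayushm-agrawal/spark-personality-test | backend/app/services.py | normalize_interest
-- ===== SOURCE A (Python) =====
-- def normalize_interest(interest: str) -> str:
--     """
--     Normalize interest string for consistent keying.
--
--     Handles variations like "Work", "work", "my job" -> "work"
--
--     Args:
--         interest: Raw interest string from user
--
--     Returns:
--         Normalized canonical interest key
--     """
--     if not interest:
--         return ""
--
--     # Lowercase and strip
--     normalized = interest.lower().strip()
--
--     # Common synonyms mapping to canonical keys
--     synonyms = {
--         "work": ["job", "career", "office", "professional", "at work", "my job", "my work", "workplace"],
--         "relationships": ["relationship", "dating", "love", "partner", "my relationship", "romantic"],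
--         "fitness": ["gym", "health", "exercise", "working out", "sports", "training", "wellness"],
--         "family": ["parenting", "kids", "children", "home", "my family", "parent"],
--         "creative": ["creativity", "art", "creative projects", "side projects", "hobbies", "artistic"],
--         "learning": ["education", "school", "study", "studying", "growth", "self-improvement"]
--     }
--
--     for canonical, variants in synonyms.items():
--         if normalized in variants or normalized == canonical:
--             return canonical
--
--     # If no match, return cleaned original
--     return normalized
-- ===== SOURCE B (Python) =====
-- SYNONYMS = {
--     "work": ["job", "career", "office", "professional", "at work", "my job", "my work", "workplace"],
--     "relationships": ["relationship", "dating", "love", "partner", "my relationship", "romantic"],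
--     "fitness": ["gym", "health", "exercise", "working out", "sports", "training", "wellness"],
--     "family": ["parenting", "kids", "children", "home", "my family", "parent"],
--     "creative": ["creativity", "art", "creative projects", "side projects", "hobbies", "artistic"],
--     "learning": ["education", "school", "study", "studying", "growth", "self-improvement"],
-- }
--
-- # Flat reverse index built once: each canonical maps to itself, each variant to its canonical.
-- _REVERSE = {s: k for k, vs in SYNONYMS.items() for s in [k, *vs]}
--
--
-- def normalize_interest(interest: str) -> str:
--     if not interest:
--         return ""
--     normalized = interest.lower().strip()
--     return _REVERSE.get(normalized, normalized)
-- ===== Notes on version B (the rewrite author's own statement) =====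
-- stated objective: simpler
-- what changed: Replaces the per-call loop over the synonyms dict with list-membership tests by a flat reverse dict (variant-or-canonical -> canonical) built once, so the lookup is a single dict.get.
import Mathlib
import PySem

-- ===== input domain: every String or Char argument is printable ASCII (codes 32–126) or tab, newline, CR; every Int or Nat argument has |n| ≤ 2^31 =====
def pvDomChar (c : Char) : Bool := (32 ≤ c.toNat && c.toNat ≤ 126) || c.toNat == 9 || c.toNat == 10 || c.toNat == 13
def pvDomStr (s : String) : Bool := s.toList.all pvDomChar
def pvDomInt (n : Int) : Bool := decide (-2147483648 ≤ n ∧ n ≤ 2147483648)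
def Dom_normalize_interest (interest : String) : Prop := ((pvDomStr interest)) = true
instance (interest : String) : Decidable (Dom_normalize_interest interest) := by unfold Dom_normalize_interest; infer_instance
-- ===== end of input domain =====

-- B replaces A's per-call scan of the synonyms dict (membership test per canonical) by a flat
-- reverse dict built once, looked up with one .get — simpler per-call logic, same values.

-- ===== PORT A =====
-- the synonyms dict of A, in insertion order
def pvSynonyms : List (String × List String) :=
  [("work", ["job", "career", "office", "professional", "at work", "my job", "my work", "workplace"]),
   ("relationships", ["relationship", "dating", "love", "partner", "my relationship", "romantic"]),
   ("fitness", ["gym", "health", "exercise", "working out", "sports", "training", "wellness"]),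
   ("family", ["parenting", "kids", "children", "home", "my family", "parent"]),
   ("creative", ["creativity", "art", "creative projects", "side projects", "hobbies", "artistic"]),
   ("learning", ["education", "school", "study", "studying", "growth", "self-improvement"])]

-- the 'for canonical, variants in synonyms.items(): if normalized in variants or normalized == canonical: return canonical' loop
def pvLoopA (items : List (String × List String)) (normalized : String) : String :=
  match items with
  | [] => normalized
  | (canonical, variants) :: rest =>
      if variants.contains normalized || normalized == canonical then canonical
      else pvLoopA rest normalized

def normalize_interest (interest : String) : String :=
  if interest == "" then ""
  else
    let normalized := PySem.Str.strip (PySem.Str.lower interest)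
    pvLoopA pvSynonyms normalized

-- ===== PORT B =====
-- _REVERSE = {s: k for k, vs in SYNONYMS.items() for s in [k, *vs]}  (built once, as a Dict literal)
def pvReverse : PySem.Dict String String :=
  PySem.Dict.ofList
    [("work", "work"), ("job", "work"), ("career", "work"), ("office", "work"),
     ("professional", "work"), ("at work", "work"), ("my job", "work"), ("my work", "work"),
     ("workplace", "work"),
     ("relationships", "relationships"), ("relationship", "relationships"), ("dating", "relationships"),
     ("love", "relationships"), ("partner", "relationships"), ("my relationship", "relationships"),
     ("romantic", "relationships"),
     ("fitness", "fitness"), ("gym", "fitness"), ("health", "fitness"), ("exercise", "fitness"),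
     ("working out", "fitness"), ("sports", "fitness"), ("training", "fitness"), ("wellness", "fitness"),
     ("family", "family"), ("parenting", "family"), ("kids", "family"), ("children", "family"),
     ("home", "family"), ("my family", "family"), ("parent", "family"),
     ("creative", "creative"), ("creativity", "creative"), ("art", "creative"),
     ("creative projects", "creative"), ("side projects", "creative"), ("hobbies", "creative"),
     ("artistic", "creative"),
     ("learning", "learning"), ("education", "learning"), ("school", "learning"), ("study", "learning"),
     ("studying", "learning"), ("growth", "learning"), ("self-improvement", "learning")]

def normalize_interest_alt (interest : String) : String :=
  if interest == "" then ""
  else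
    let normalized := PySem.Str.strip (PySem.Str.lower interest)
    pvReverse.getD normalized normalized

-- ===== PRECONDITION & SPEC =====
def Spec_normalize_interest (interest : String) (out : String) : Prop := out = normalize_interest_alt interest
instance (interest : String) (out : String) : Decidable (Spec_normalize_interest interest out) := by unfold Spec_normalize_interest; infer_instance

-- ===== CLAIM (what is proved, stated in full; the proofs are below) =====
def Claim_equal_normalize_interest : Prop := ∀ (interest : String), Dom_normalize_interest interest → Spec_normalize_interest interest (normalize_interest interest)

-- ===== LEMMAS AND PROOFS =====

-- all keys of the flat table (= all canonicals and variants of A)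
def pvAllKeys : List String :=
  ["work", "job", "career", "office", "professional", "at work", "my job", "my work", "workplace",
   "relationships", "relationship", "dating", "love", "partner", "my relationship", "romantic",
   "fitness", "gym", "health", "exercise", "working out", "sports", "training", "wellness",
   "family", "parenting", "kids", "children", "home", "my family", "parent",
   "creative", "creativity", "art", "creative projects", "side projects", "hobbies", "artistic",
   "learning", "education", "school", "study", "studying", "growth", "self-improvement"]

def pvFlat : List (String × String) :=
  [("work", "work"), ("job", "work"), ("career", "work"), ("office", "work"),
   ("professional", "work"), ("at work", "work"), ("my job", "work"), ("my work", "work"),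
   ("workplace", "work"),
   ("relationships", "relationships"), ("relationship", "relationships"), ("dating", "relationships"),
   ("love", "relationships"), ("partner", "relationships"), ("my relationship", "relationships"),
   ("romantic", "relationships"),
   ("fitness", "fitness"), ("gym", "fitness"), ("health", "fitness"), ("exercise", "fitness"),
   ("working out", "fitness"), ("sports", "fitness"), ("training", "fitness"), ("wellness", "fitness"),
   ("family", "family"), ("parenting", "family"), ("kids", "family"), ("children", "family"),
   ("home", "family"), ("my family", "family"), ("parent", "family"),
   ("creative", "creative"), ("creativity", "creative"), ("art", "creative"),
   ("creative projects", "creative"), ("side projects", "creative"), ("hobbies", "creative"),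
   ("artistic", "creative"),
   ("learning", "learning"), ("education", "learning"), ("school", "learning"), ("study", "learning"),
   ("studying", "learning"), ("growth", "learning"), ("self-improvement", "learning")]

set_option maxRecDepth 2048 in
lemma pvReverse_keys : pvReverse.keys = pvAllKeys := by rfl

set_option maxRecDepth 2048 in
set_option maxHeartbeats 2000000 in
lemma pvCore (n : String) : pvLoopA pvSynonyms n = pvReverse.getD n n := by
  by_cases h : n ∈ pvAllKeys
  · fin_cases h <;> rfl
  · have hc : pvReverse.contains n = false := by
      by_contra hcon
      rw [Bool.not_eq_false, PySem.Dict.contains_iff_mem_keys, pvReverse_keys] at hcon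
      exact h hcon
    have hB : pvReverse.getD n n = n := PySem.Dict.getD_of_not_contains pvReverse n hc
    rw [hB]
    simp only [pvAllKeys, List.mem_cons, List.not_mem_nil, or_false, not_or] at h
    obtain ⟨h1, h2, h3, h4, h5, h6, h7, h8, h9, h10, h11, h12, h13, h14, h15, h16, h17, h18,
      h19, h20, h21, h22, h23, h24, h25, h26, h27, h28, h29, h30, h31, h32, h33, h34, h35,
      h36, h37, h38, h39, h40, h41, h42, h43, h44, h45⟩ := h
    simp [pvLoopA, pvSynonyms, h1, h2, h3, h4, h5, h6, h7, h8, h9, h10, h11, h12, h13, h14, h15, h16, h17, h18, h19, h20, h21, h22, h23, h24, h25, h26, h27, h28, h29, h30, h31, h32, h33, h34, h35, h36, h37, h38, h39, h40, h41, h42, h43, h44, h45]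

-- ===== VERDICT (by name: the statement is the Claim_ definition above) =====
theorem normalize_interest_spec : Claim_equal_normalize_interest := by
  intro interest _
  unfold Spec_normalize_interest normalize_interest normalize_interest_alt
  by_cases h : interest == ""
  · simp [h]
  · simp only [h, Bool.false_eq_true, if_false]
    exact pvCore _
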